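-- pv_equiv track=rewrite | github.com/joe0731/modelsig | modelsig/signature/fingerprint.py | _infer_unique_ops_highlevel
-- ===== SOURCE A (Python) =====
-- from typing import Any, Dict, List, Optional, Set, Tuple
--
-- def _infer_unique_ops_highlevel(tensor_meta: dict) -> Set[str]:
--     ops: Set[str] = set()
--     for key in tensor_meta:
--         k = key.lower()
--         if any(x in k for x in ("q_proj", "k_proj", "v_proj", "o_proj", "self_attn", "attention")):
--             ops.add("Attention")
--         if any(x in k for x in ("gate_proj", "up_proj", "down_proj", "swiglu", "ffn", "mlp")):
--             ops.add("SwiGLU/FFN")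
--         if any(x in k for x in ("experts", "moe", "router")):
--             ops.add("MoE")
--         if any(x in k for x in ("norm", "layernorm", "rmsnorm", "layer_norm")):
--             ops.add("Norm")
--         if "embed" in k:
--             ops.add("Embedding")
--         if any(x in k for x in ("lm_head", "head")):
--             ops.add("LMHead")
--         if any(x in k for x in ("rotary", "rope", "pos_emb")):
--             ops.add("RotaryEmb")
--     return ops or {"Linear"}
-- ===== SOURCE B (Python) =====
-- # Worklist rewrite: track the still-unmatched categories and shrink that list key by key,
-- # stopping as soon as every category has been found; no per-key membership/dedup work.
-- _CATEGORIES = [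
--     ("Attention", ("q_proj", "k_proj", "v_proj", "o_proj", "self_attn", "attention")),
--     ("SwiGLU/FFN", ("gate_proj", "up_proj", "down_proj", "swiglu", "ffn", "mlp")),
--     ("MoE", ("experts", "moe", "router")),
--     ("Norm", ("norm", "layernorm", "rmsnorm", "layer_norm")),
--     ("Embedding", ("embed",)),
--     ("LMHead", ("lm_head", "head")),
--     ("RotaryEmb", ("rotary", "rope", "pos_emb")),
-- ]
--
-- def _infer_unique_ops_highlevel(tensor_meta):
--     pending = list(_CATEGORIES)
--     found = []
--     for key in tensor_meta:
--         if not pending: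
--             break
--         k = key.lower()
--         found.extend(label for label, subs in pending
--                            if any(s in k for s in subs))
--         pending = [c for c in pending
--                      if not any(s in k for s in c[1])]
--     return set(found) if found else {"Linear"}
-- ===== Notes on version B (the rewrite author's own statement) =====
-- stated objective: alternative
-- what changed: Instead of testing every key against all seven substring groups and deduplicating through a set, B keeps a worklist of still-unmatched categories, removes a category the first time some key matches it (so each category is tested only while unmatched and the result list is duplicate-free by construction), and stops scanning keys early once the worklist is empty.
import Mathlib
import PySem

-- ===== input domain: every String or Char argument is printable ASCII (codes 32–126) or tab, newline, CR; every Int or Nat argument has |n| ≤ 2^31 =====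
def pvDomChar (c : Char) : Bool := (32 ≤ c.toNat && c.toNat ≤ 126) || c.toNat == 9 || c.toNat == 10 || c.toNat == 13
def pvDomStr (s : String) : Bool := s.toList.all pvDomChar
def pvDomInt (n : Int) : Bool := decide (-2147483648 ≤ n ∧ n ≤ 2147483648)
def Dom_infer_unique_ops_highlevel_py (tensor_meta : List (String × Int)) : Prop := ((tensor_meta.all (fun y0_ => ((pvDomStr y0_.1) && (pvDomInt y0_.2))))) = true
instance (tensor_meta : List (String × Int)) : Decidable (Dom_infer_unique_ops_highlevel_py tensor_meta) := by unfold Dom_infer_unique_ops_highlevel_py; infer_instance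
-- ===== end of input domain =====

-- B replaces A's per-key seven-way test + set dedup by a shrinking worklist of still-unmatched
-- categories with an early exit once all are found (alternative decomposition, same worst-case cost).

-- ===== PORT A =====
def infer_unique_ops_highlevel_py (tensor_meta : List (String × Int)) : List String :=
  let ops : PySem.Set String := tensor_meta.foldl (fun ops kv =>
    let k := PySem.Str.lower kv.1
    let ops := if ["q_proj", "k_proj", "v_proj", "o_proj", "self_attn", "attention"].any (fun x => PySem.Str.isIn x k) then PySem.Set.add ops "Attention" else ops
    let ops := if ["gate_proj", "up_proj", "down_proj", "swiglu", "ffn", "mlp"].any (fun x => PySem.Str.isIn x k) then PySem.Set.add ops "SwiGLU/FFN" else ops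
    let ops := if ["experts", "moe", "router"].any (fun x => PySem.Str.isIn x k) then PySem.Set.add ops "MoE" else ops
    let ops := if ["norm", "layernorm", "rmsnorm", "layer_norm"].any (fun x => PySem.Str.isIn x k) then PySem.Set.add ops "Norm" else ops
    let ops := if PySem.Str.isIn "embed" k then PySem.Set.add ops "Embedding" else ops
    let ops := if ["lm_head", "head"].any (fun x => PySem.Str.isIn x k) then PySem.Set.add ops "LMHead" else ops
    let ops := if ["rotary", "rope", "pos_emb"].any (fun x => PySem.Str.isIn x k) then PySem.Set.add ops "RotaryEmb" else ops
    ops) PySem.Set.empty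
  if ops = [] then ["Linear"] else ops

-- ===== PORT B =====
def pvCategories : List (String × List String) :=
  [("Attention", ["q_proj", "k_proj", "v_proj", "o_proj", "self_attn", "attention"]),
   ("SwiGLU/FFN", ["gate_proj", "up_proj", "down_proj", "swiglu", "ffn", "mlp"]),
   ("MoE", ["experts", "moe", "router"]),
   ("Norm", ["norm", "layernorm", "rmsnorm", "layer_norm"]),
   ("Embedding", ["embed"]),
   ("LMHead", ["lm_head", "head"]),
   ("RotaryEmb", ["rotary", "rope", "pos_emb"])]

-- the loop of B: worklist 'pending' of unmatched categories, accumulator 'found', early break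
def pvAltLoop (pending : List (String × List String)) (found : List String) :
    List (String × Int) → List String
  | [] => found
  | kv :: rest =>
    if pending = [] then found
    else
      let k := PySem.Str.lower kv.1
      let found' := found ++ (pending.filter (fun c => c.2.any (fun s => PySem.Str.isIn s k))).map Prod.fst
      let pending' := pending.filter (fun c => !c.2.any (fun s => PySem.Str.isIn s k))
      pvAltLoop pending' found' rest

def infer_unique_ops_highlevel_py_alt (tensor_meta : List (String × Int)) : List String :=
  let found := pvAltLoop pvCategories [] tensor_meta
  let ops : PySem.Set String := PySem.Set.ofList found
  if ops = [] then ["Linear"] else ops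

-- ===== PRECONDITION & SPEC =====
def Spec_infer_unique_ops_highlevel_py (tensor_meta : List (String × Int)) (out : List String) : Prop := out = infer_unique_ops_highlevel_py_alt tensor_meta
instance (tensor_meta : List (String × Int)) (out : List String) : Decidable (Spec_infer_unique_ops_highlevel_py tensor_meta out) := by unfold Spec_infer_unique_ops_highlevel_py; infer_instance

-- ===== CLAIM =====
def Claim_equal_infer_unique_ops_highlevel_py : Prop := ∀ (tensor_meta : List (String × Int)), Dom_infer_unique_ops_highlevel_py tensor_meta → Spec_infer_unique_ops_highlevel_py tensor_meta (infer_unique_ops_highlevel_py tensor_meta)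

-- ===== LEMMAS AND PROOFS =====

-- the labels A adds for one (already lowered) key, in A's test order
def pvLabelsFor (k : String) : List String :=
  pvCategories.flatMap (fun c => if c.2.any (fun s => PySem.Str.isIn s k) then [c.1] else [])

theorem pvFoldl_condSingle {α β : Type} (f : β → α → β) (c : Bool) (a : α) (ops : β) (rest : List α) :
    List.foldl f ops ((if c then [a] else []) ++ rest) = List.foldl f (if c then f ops a else ops) rest := by
  cases c <;> simp

-- A's per-key step equals folding Set.add over pvLabelsFor of that key
theorem pvStep_eq (ops : PySem.Set String) (k : String) :
    (let ops := if ["q_proj", "k_proj", "v_proj", "o_proj", "self_attn", "attention"].any (fun x => PySem.Str.isIn x k) then PySem.Set.add ops "Attention" else ops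
     let ops := if ["gate_proj", "up_proj", "down_proj", "swiglu", "ffn", "mlp"].any (fun x => PySem.Str.isIn x k) then PySem.Set.add ops "SwiGLU/FFN" else ops
     let ops := if ["experts", "moe", "router"].any (fun x => PySem.Str.isIn x k) then PySem.Set.add ops "MoE" else ops
     let ops := if ["norm", "layernorm", "rmsnorm", "layer_norm"].any (fun x => PySem.Str.isIn x k) then PySem.Set.add ops "Norm" else ops
     let ops := if PySem.Str.isIn "embed" k then PySem.Set.add ops "Embedding" else ops
     let ops := if ["lm_head", "head"].any (fun x => PySem.Str.isIn x k) then PySem.Set.add ops "LMHead" else ops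
     let ops := if ["rotary", "rope", "pos_emb"].any (fun x => PySem.Str.isIn x k) then PySem.Set.add ops "RotaryEmb" else ops
     ops)
    = List.foldl PySem.Set.add ops (pvLabelsFor k) := by
  simp only [pvLabelsFor, pvCategories, List.flatMap_cons, List.flatMap_nil, List.any_cons,
    List.any_nil, Bool.or_false]
  rw [pvFoldl_condSingle, pvFoldl_condSingle, pvFoldl_condSingle, pvFoldl_condSingle,
    pvFoldl_condSingle, pvFoldl_condSingle, pvFoldl_condSingle, List.foldl_nil]

theorem pvFold_eq (tm : List (String × Int)) (ops : PySem.Set String) :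
    tm.foldl (fun ops kv =>
      let k := PySem.Str.lower kv.1
      let ops := if ["q_proj", "k_proj", "v_proj", "o_proj", "self_attn", "attention"].any (fun x => PySem.Str.isIn x k) then PySem.Set.add ops "Attention" else ops
      let ops := if ["gate_proj", "up_proj", "down_proj", "swiglu", "ffn", "mlp"].any (fun x => PySem.Str.isIn x k) then PySem.Set.add ops "SwiGLU/FFN" else ops
      let ops := if ["experts", "moe", "router"].any (fun x => PySem.Str.isIn x k) then PySem.Set.add ops "MoE" else ops
      let ops := if ["norm", "layernorm", "rmsnorm", "layer_norm"].any (fun x => PySem.Str.isIn x k) then PySem.Set.add ops "Norm" else ops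
      let ops := if PySem.Str.isIn "embed" k then PySem.Set.add ops "Embedding" else ops
      let ops := if ["lm_head", "head"].any (fun x => PySem.Str.isIn x k) then PySem.Set.add ops "LMHead" else ops
      let ops := if ["rotary", "rope", "pos_emb"].any (fun x => PySem.Str.isIn x k) then PySem.Set.add ops "RotaryEmb" else ops
      ops) ops
    = List.foldl PySem.Set.add ops (tm.flatMap (fun kv => pvLabelsFor (PySem.Str.lower kv.1))) := by
  induction tm generalizing ops with
  | nil => rfl
  | cons hd tl ih =>
    simp only [List.foldl_cons, List.flatMap_cons, List.foldl_append]
    rw [← pvStep_eq ops (PySem.Str.lower hd.1)]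
    exact ih _

-- category labels are pairwise distinct
theorem pvCats_nodup : (pvCategories.map Prod.fst).Nodup := by decide

-- folding Set.add over the conditionally-selected labels of a category list
theorem pvAdd_flatMap (cats : List (String × List String)) (found : List String)
    (m : String × List String → Bool) (h : (cats.map Prod.fst).Nodup) :
    List.foldl PySem.Set.add found (cats.flatMap (fun c => if m c then [c.1] else []))
      = found ++ (cats.filter (fun c => m c && !decide (c.1 ∈ found))).map Prod.fst := by
  induction cats generalizing found with
  | nil => simp
  | cons c cs ih =>
    simp only [List.map_cons, List.nodup_cons] at h
    simp only [List.flatMap_cons, List.filter_cons]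
    rw [pvFoldl_condSingle]
    by_cases hm : m c = true
    · by_cases hf : c.1 ∈ found
      · rw [if_pos hm, PySem.Set.add_of_mem hf, ih found h.2]
        simp [hm, hf]
      · rw [if_pos hm, PySem.Set.add_of_not_mem hf, ih (found ++ [c.1]) h.2]
        have hfilt : (cs.filter (fun c' => m c' && !decide (c'.1 ∈ found ++ [c.1])))
            = cs.filter (fun c' => m c' && !decide (c'.1 ∈ found)) := by
          apply List.filter_congr
          intro c' hc'
          have hne : c'.1 ≠ c.1 := fun he => h.1 (he ▸ List.mem_map_of_mem hc')
          simp [List.mem_append, hne]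
        rw [hfilt]
        simp [hm, hf]
    · rw [if_neg hm, ih found h.2]
      simp [hm]

-- if every category label is already in found, folding the labels of any key list changes nothing
theorem pvFold_fixed (tm : List (String × Int)) (found : List String)
    (h : ∀ c ∈ pvCategories, c.1 ∈ found) :
    List.foldl PySem.Set.add found (tm.flatMap (fun kv => pvLabelsFor (PySem.Str.lower kv.1))) = found := by
  induction tm with
  | nil => rfl
  | cons kv rest ih =>
    simp only [List.flatMap_cons, List.foldl_append]
    rw [pvLabelsFor, pvAdd_flatMap _ _ _ pvCats_nodup]
    have hnil : (pvCategories.filter (fun c => (c.2.any fun s => PySem.Str.isIn s (PySem.Str.lower kv.1)) && !decide (c.1 ∈ found))) = [] := by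
      rw [List.filter_eq_nil_iff]
      intro c hc
      simp [h c hc]
    rw [hnil]
    simpa using ih

-- category labels determine the category
theorem pvCats_inj : ∀ c ∈ pvCategories, ∀ c' ∈ pvCategories, c'.1 = c.1 → c' = c := by decide

-- main invariant: the worklist loop computes A's Set.add fold
theorem pvLoop_eq (tm : List (String × Int)) (found : List String)
    (pending : List (String × List String))
    (hp : pending = pvCategories.filter (fun c => !decide (c.1 ∈ found))) :
    pvAltLoop pending found tm
      = List.foldl PySem.Set.add found (tm.flatMap (fun kv => pvLabelsFor (PySem.Str.lower kv.1))) := by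
  induction tm generalizing found pending with
  | nil => rfl
  | cons kv rest ih =>
    rw [pvAltLoop]
    by_cases hnil : pending = []
    · rw [if_pos hnil]
      rw [hnil] at hp
      replace hp := hp.symm
      rw [List.filter_eq_nil_iff] at hp
      refine (pvFold_fixed _ _ ?_).symm
      intro c hc
      simpa using hp c hc
    · rw [if_neg hnil]
      simp only [List.flatMap_cons, List.foldl_append]
      set k := PySem.Str.lower kv.1 with hk
      set m : String × List String → Bool := fun c => c.2.any (fun s => PySem.Str.isIn s k) with hm
      have hstep : List.foldl PySem.Set.add found (pvLabelsFor k)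
          = found ++ (pending.filter m).map Prod.fst := by
        rw [pvLabelsFor, pvAdd_flatMap _ _ _ pvCats_nodup, hp, List.filter_filter]
      rw [hstep]
      apply ih
      conv_lhs => rw [hp, List.filter_filter]
      apply List.filter_congr
      intro c hc
      have hmem : c.1 ∈ ((pending.filter m).map Prod.fst) ↔ (c ∈ pending ∧ m c = true) := by
        constructor
        · intro hmm
          obtain ⟨c', hc', he⟩ := List.mem_map.mp hmm
          obtain ⟨hc'p, hc'm⟩ := List.mem_filter.mp hc'
          have hceq : c' = c := pvCats_inj c hc c' (List.mem_of_mem_filter (hp ▸ hc'p)) he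
          exact ⟨hceq ▸ hc'p, hceq ▸ hc'm⟩
        · rintro ⟨h1, h2⟩
          exact List.mem_map_of_mem (List.mem_filter.mpr ⟨h1, h2⟩)
      have hpend : c ∈ pending ↔ c.1 ∉ found := by
        rw [hp, List.mem_filter]
        simp [hc]
      by_cases hf : c.1 ∈ found
      · have hX : c.1 ∉ ((pending.filter m).map Prod.fst) := by
          intro hx
          exact (hpend.mp (hmem.mp hx).1) hf
        simp [List.mem_append, hf, hX]
      · by_cases hmc : m c = true
        · have hX : c.1 ∈ ((pending.filter m).map Prod.fst) := hmem.mpr ⟨hpend.mpr hf, hmc⟩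
          rw [hm] at hmc
          simp [List.mem_append, hf, hX]
          simpa using hmc
        · have hX : c.1 ∉ ((pending.filter m).map Prod.fst) := by
            intro hx
            exact hmc (hmem.mp hx).2
          rw [hm] at hmc
          simp [List.mem_append, hf, hX]
          simpa using hmc

-- ===== VERDICT =====
theorem infer_unique_ops_highlevel_py_spec : Claim_equal_infer_unique_ops_highlevel_py := by
  intro tm _
  unfold Spec_infer_unique_ops_highlevel_py
  simp only [infer_unique_ops_highlevel_py, infer_unique_ops_highlevel_py_alt]
  rw [pvFold_eq, pvLoop_eq tm [] pvCategories (by simp)]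
  have hnd : (List.foldl PySem.Set.add [] (tm.flatMap (fun kv => pvLabelsFor (PySem.Str.lower kv.1)))).Nodup := by
    rw [← PySem.Set.ofList_eq_foldl]
    exact PySem.Set.nodup_ofList _
  rw [PySem.Set.ofList_eq_self_of_nodup _ hnd]
  rfl
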